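-- pv_equiv track=rewrite | github.com/DanMayhem/pirv | pirv/election.py | _find_results
-- ===== SOURCE A (Python) =====
-- def _find_results(tally):
--   first = None
--   last = None
--   for c in tally:
--     if first is None:
--       first = [c]
--     elif tally[c] == tally[first[0]]:
--       first.append(c)
--     elif tally[c] > tally[first[0]]:
--       first = [c]
--     if last is None:
--       last = [c]
--     elif tally[c] == tally[last[0]]:
--       last.append(c)
--     elif tally[c] < tally[last[0]]:
--       last = [c]
--   return (first, last)
-- ===== SOURCE B (Python) =====
-- def _find_results(tally):
--     if not tally:
--         return (None, None)
--     values = list(tally.values())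
--     hi = max(values)
--     lo = min(values)
--     first = [c for c, v in tally.items() if v == hi]
--     last = [c for c, v in tally.items() if v == lo]
--     return (first, last)
-- ===== Notes on version B (the rewrite author's own statement) =====
-- stated objective: simpler
-- what changed: replaces A's single online pass that maintains both tied groups with branch chains by computing max and min of the values once and then building each tied group with a filtering comprehension
-- outside the precondition, e.g. on _find_results({}): A returns (None, None), B returns (None, None)
import Mathlib
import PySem

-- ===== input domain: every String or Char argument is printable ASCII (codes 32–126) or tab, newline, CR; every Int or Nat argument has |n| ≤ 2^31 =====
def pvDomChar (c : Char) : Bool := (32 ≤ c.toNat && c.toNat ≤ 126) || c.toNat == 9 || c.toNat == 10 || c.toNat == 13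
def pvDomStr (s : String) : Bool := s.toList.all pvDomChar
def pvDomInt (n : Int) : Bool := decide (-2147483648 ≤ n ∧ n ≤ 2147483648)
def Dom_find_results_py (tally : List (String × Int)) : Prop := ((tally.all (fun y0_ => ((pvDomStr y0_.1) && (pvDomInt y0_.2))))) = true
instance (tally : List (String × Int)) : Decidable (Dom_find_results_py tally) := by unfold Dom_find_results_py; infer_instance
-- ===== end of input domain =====

-- B computes max and min of the values once and builds each tied group by a filtering pass,
-- instead of A's single online pass maintaining both tied groups ('simpler'; not faster).

-- ===== PORT A =====
-- 'for c in tally' iterates the dict's keys and 'tally[c]' looks up the iterated key's value;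
-- with the dict given as an association list with distinct keys (Pre_), iterating its
-- (key, value) pairs and reading the pair's value is exact. 'first'/'last' hold the kept
-- pairs; A keeps only keys and re-looks values up, which gives the same values.
def maxStep_A (f : List (String × Int)) (c : String × Int) : List (String × Int) :=
  if c.2 = (f.headD ("", 0)).2 then f ++ [c]
  else if c.2 > (f.headD ("", 0)).2 then [c]
  else f

def minStep_A (l : List (String × Int)) (c : String × Int) : List (String × Int) :=
  if c.2 = (l.headD ("", 0)).2 then l ++ [c]
  else if c.2 < (l.headD ("", 0)).2 then [c]
  else l

def step_A (st : Option (List (String × Int)) × Option (List (String × Int)))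
    (c : String × Int) :
    Option (List (String × Int)) × Option (List (String × Int)) :=
  (match st.1 with
   | none => some [c]
   | some f => some (maxStep_A f c),
   match st.2 with
   | none => some [c]
   | some l => some (minStep_A l c))

-- On the empty dict A returns (None, None), which is not a pair of lists: Pre_ excludes it,
-- and '.getD []' below is a placeholder never reached under Pre_.
def find_results_py (tally : List (String × Int)) : List String × List String :=
  let st := tally.foldl step_A (none, none)
  ((st.1.getD []).map (·.1), (st.2.getD []).map (·.1))

-- ===== PORT B =====
def find_results_py_alt (tally : List (String × Int)) : List String × List String :=
  match tally with
  | [] => ([], [])   -- Source B returns (None, None) here; excluded by Pre_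
  | _ :: _ =>
    let values := tally.map (·.2)
    let hi := (PySem.List.max? values id).getD 0
    let lo := (PySem.List.min? values id).getD 0
    ((tally.filter (fun p => p.2 == hi)).map (·.1),
     (tally.filter (fun p => p.2 == lo)).map (·.1))

-- ===== PRECONDITION & SPEC =====
-- Pre_ excludes the empty dict, where A returns (None, None) — not a value of the declared
-- pair-of-lists type — and association lists with duplicate keys, which do not faithfully
-- represent a Python dict (dict construction collapses duplicates before A runs).
def Pre_find_results_py (tally : List (String × Int)) : Prop :=
  tally ≠ [] ∧ (tally.map Prod.fst).Nodup
instance (tally : List (String × Int)) : Decidable (Pre_find_results_py tally) := by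
  unfold Pre_find_results_py; infer_instance

def pvWitness_find_results_py : (List (String × Int)) := [("a", 1), ("b", 2)]

def Spec_find_results_py (tally : List (String × Int)) (out : List String × List String) : Prop := out = find_results_py_alt tally
instance (tally : List (String × Int)) (out : List String × List String) : Decidable (Spec_find_results_py tally out) := by unfold Spec_find_results_py; infer_instance

-- ===== CLAIM (what is proved, stated in full; the proofs are below) =====
def Claim_equal_find_results_py : Prop := ∀ (tally : List (String × Int)), Dom_find_results_py tally → Pre_find_results_py tally → Spec_find_results_py tally (find_results_py tally)

-- ===== LEMMAS AND PROOFS =====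

-- running maximum / minimum of the values of ys, started at m
def vmax (m : Int) (ys : List (String × Int)) : Int :=
  ys.foldl (fun a p => if a < p.2 then p.2 else a) m

def vmin (m : Int) (ys : List (String × Int)) : Int :=
  ys.foldl (fun a p => if p.2 < a then p.2 else a) m

theorem le_vmax (ys : List (String × Int)) (m : Int) : m ≤ vmax m ys := by
  induction ys generalizing m with
  | nil => simp [vmax]
  | cons c t ih =>
    simp only [vmax, List.foldl_cons]
    refine le_trans ?_ (ih (if m < c.2 then c.2 else m))
    split <;> omega

theorem vmin_le (ys : List (String × Int)) (m : Int) : vmin m ys ≤ m := by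
  induction ys generalizing m with
  | nil => simp [vmin]
  | cons c t ih =>
    simp only [vmin, List.foldl_cons]
    refine le_trans (ih (if c.2 < m then c.2 else m)) ?_
    split <;> omega

theorem headD_snd_of_all {f : List (String × Int)} {m : Int}
    (hne : f ≠ []) (hall : ∀ p ∈ f, p.2 = m) : (f.headD ("", 0)).2 = m := by
  cases f with
  | nil => exact absurd rfl hne
  | cons a t => exact hall a (List.mem_cons_self)

theorem max_loop (ys : List (String × Int)) :
    ∀ (f : List (String × Int)) (m : Int), f ≠ [] → (∀ p ∈ f, p.2 = m) →
    ys.foldl maxStep_A f =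
      (if vmax m ys = m then f else []) ++ ys.filter (fun p => p.2 == vmax m ys) := by
  induction ys with
  | nil => intro f m hne _; simp [vmax]
  | cons c t ih =>
    intro f m hne hall
    have hh := headD_snd_of_all hne hall
    simp only [List.foldl_cons]
    have hv : vmax m (c :: t) = vmax (if m < c.2 then c.2 else m) t := by
      simp [vmax]
    by_cases hc : c.2 = m
    · have hstep : maxStep_A f c = f ++ [c] := by
        unfold maxStep_A; rw [hh, if_pos hc]
      have hall' : ∀ p ∈ f ++ [c], p.2 = m := by
        intro p hp
        rcases List.mem_append.mp hp with h | h
        · exact hall p h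
        · simp at h; simp [h, hc]
      rw [hstep, ih (f ++ [c]) m (by simp) hall', hv,
        show (if m < c.2 then c.2 else m) = m by omega]
      by_cases h2 : vmax m t = m
      · rw [if_pos h2, if_pos h2, List.filter_cons, if_pos (show (c.2 == vmax m t) = true by simp [hc, h2])]
        simp
      · rw [if_neg h2, if_neg h2, List.filter_cons,
          if_neg (show ¬ ((c.2 == vmax m t) = true) by intro hb; rw [beq_iff_eq] at hb; omega)]
    · by_cases hgt : c.2 > m
      · have hstep : maxStep_A f c = [c] := by
          unfold maxStep_A; rw [hh, if_neg hc, if_pos hgt]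
        rw [hstep, ih [c] c.2 (by simp) (by simp), hv,
          show (if m < c.2 then c.2 else m) = c.2 by omega]
        have hge : c.2 ≤ vmax c.2 t := le_vmax t c.2
        have hm : vmax c.2 t ≠ m := by omega
        rw [if_neg hm, List.filter_cons]
        by_cases h2 : vmax c.2 t = c.2
        · rw [if_pos h2, if_pos (show (c.2 == vmax c.2 t) = true by simp [h2])]; simp
        · rw [if_neg h2,
            if_neg (show ¬ ((c.2 == vmax c.2 t) = true) by intro hb; rw [beq_iff_eq] at hb; omega)]
      · have hstep : maxStep_A f c = f := by
          unfold maxStep_A; rw [hh, if_neg hc, if_neg hgt]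
        rw [hstep, ih f m hne hall, hv,
          show (if m < c.2 then c.2 else m) = m by omega]
        have hge : m ≤ vmax m t := le_vmax t m
        rw [List.filter_cons,
          if_neg (show ¬ ((c.2 == vmax m t) = true) by intro hb; rw [beq_iff_eq] at hb; omega)]

theorem min_loop (ys : List (String × Int)) :
    ∀ (l : List (String × Int)) (m : Int), l ≠ [] → (∀ p ∈ l, p.2 = m) →
    ys.foldl minStep_A l =
      (if vmin m ys = m then l else []) ++ ys.filter (fun p => p.2 == vmin m ys) := by
  induction ys with
  | nil => intro l m hne _; simp [vmin]
  | cons c t ih =>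
    intro l m hne hall
    have hh := headD_snd_of_all hne hall
    simp only [List.foldl_cons]
    have hv : vmin m (c :: t) = vmin (if c.2 < m then c.2 else m) t := by
      simp [vmin]
    by_cases hc : c.2 = m
    · have hstep : minStep_A l c = l ++ [c] := by
        unfold minStep_A; rw [hh, if_pos hc]
      have hall' : ∀ p ∈ l ++ [c], p.2 = m := by
        intro p hp
        rcases List.mem_append.mp hp with h | h
        · exact hall p h
        · simp at h; simp [h, hc]
      rw [hstep, ih (l ++ [c]) m (by simp) hall', hv,
        show (if c.2 < m then c.2 else m) = m by omega]
      by_cases h2 : vmin m t = m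
      · rw [if_pos h2, if_pos h2, List.filter_cons, if_pos (show (c.2 == vmin m t) = true by simp [hc, h2])]
        simp
      · rw [if_neg h2, if_neg h2, List.filter_cons,
          if_neg (show ¬ ((c.2 == vmin m t) = true) by intro hb; rw [beq_iff_eq] at hb; omega)]
    · by_cases hlt : c.2 < m
      · have hstep : minStep_A l c = [c] := by
          unfold minStep_A; rw [hh, if_neg hc, if_pos hlt]
        rw [hstep, ih [c] c.2 (by simp) (by simp), hv,
          show (if c.2 < m then c.2 else m) = c.2 by omega]
        have hle : vmin c.2 t ≤ c.2 := vmin_le t c.2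
        have hm : vmin c.2 t ≠ m := by omega
        rw [if_neg hm, List.filter_cons]
        by_cases h2 : vmin c.2 t = c.2
        · rw [if_pos h2, if_pos (show (c.2 == vmin c.2 t) = true by simp [h2])]; simp
        · rw [if_neg h2,
            if_neg (show ¬ ((c.2 == vmin c.2 t) = true) by intro hb; rw [beq_iff_eq] at hb; omega)]
      · have hstep : minStep_A l c = l := by
          unfold minStep_A; rw [hh, if_neg hc, if_neg hlt]
        rw [hstep, ih l m hne hall, hv,
          show (if c.2 < m then c.2 else m) = m by omega]
        have hle : vmin m t ≤ m := vmin_le t m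
        rw [List.filter_cons,
          if_neg (show ¬ ((c.2 == vmin m t) = true) by intro hb; rw [beq_iff_eq] at hb; omega)]

theorem pair_fold (ys : List (String × Int)) :
    ∀ f l, ys.foldl step_A (some f, some l) =
      (some (ys.foldl maxStep_A f), some (ys.foldl minStep_A l)) := by
  induction ys with
  | nil => intro f l; rfl
  | cons c t ih => intro f l; simp only [List.foldl_cons]; exact ih _ _

theorem max?_cons (vs : List Int) :
    ∀ a, PySem.List.max? (a :: vs) id = some (vs.foldl (fun m v => if m < v then v else m) a) := by
  induction vs with
  | nil => intro a; rfl
  | cons v t ih =>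
    intro a
    have h1 : PySem.List.max? (a :: v :: t) id
        = PySem.List.max? ((if a < v then v else a) :: t) id := by
      simp only [PySem.List.max?, List.foldl_cons, id_eq]
      by_cases h : a < v <;> simp [h]
    rw [h1, ih]
    simp only [List.foldl_cons]

theorem min?_cons (vs : List Int) :
    ∀ a, PySem.List.min? (a :: vs) id = some (vs.foldl (fun m v => if v < m then v else m) a) := by
  induction vs with
  | nil => intro a; rfl
  | cons v t ih =>
    intro a
    have h1 : PySem.List.min? (a :: v :: t) id
        = PySem.List.min? ((if v < a then v else a) :: t) id := by
      simp only [PySem.List.min?, List.foldl_cons, id_eq]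
      by_cases h : v < a <;> simp [h]
    rw [h1, ih]
    simp only [List.foldl_cons]

theorem hi_eq (x : String × Int) (t : List (String × Int)) :
    (PySem.List.max? ((x :: t).map (·.2)) id).getD 0 = vmax x.2 t := by
  rw [List.map_cons, max?_cons, Option.getD_some, List.foldl_map]
  rfl

theorem lo_eq (x : String × Int) (t : List (String × Int)) :
    (PySem.List.min? ((x :: t).map (·.2)) id).getD 0 = vmin x.2 t := by
  rw [List.map_cons, min?_cons, Option.getD_some, List.foldl_map]
  rfl

-- ===== VERDICT (by name: the statement is the Claim_ definition above) =====
theorem find_results_py_spec : Claim_equal_find_results_py := by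
  intro tally _ hpre
  obtain ⟨hne, _⟩ := hpre
  unfold Spec_find_results_py
  cases tally with
  | nil => exact absurd rfl hne
  | cons x t =>
    show find_results_py (x :: t) = find_results_py_alt (x :: t)
    unfold find_results_py find_results_py_alt
    simp only [List.foldl_cons, hi_eq, lo_eq]
    have hstep0 : step_A (none, none) x = (some [x], some [x]) := rfl
    rw [hstep0, pair_fold,
      max_loop t [x] x.2 (by simp) (by simp),
      min_loop t [x] x.2 (by simp) (by simp)]
    simp only [Option.getD_some]
    congr 1
    · by_cases h : vmax x.2 t = x.2
      · rw [if_pos h, List.filter_cons,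
          if_pos (show (x.2 == vmax x.2 t) = true by simp [h])]
        simp
      · have hge := le_vmax t x.2
        rw [if_neg h, List.filter_cons,
          if_neg (show ¬ ((x.2 == vmax x.2 t) = true) by intro hb; rw [beq_iff_eq] at hb; omega)]
        simp
    · by_cases h : vmin x.2 t = x.2
      · rw [if_pos h, List.filter_cons,
          if_pos (show (x.2 == vmin x.2 t) = true by simp [h])]
        simp
      · have hle := vmin_le t x.2
        rw [if_neg h, List.filter_cons,
          if_neg (show ¬ ((x.2 == vmin x.2 t) = true) by intro hb; rw [beq_iff_eq] at hb; omega)]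
        simp
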